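-- pv_equiv track=rewrite | github.com/jdrae/algorithm | string/AC.py | solution
-- ===== SOURCE A (Python) =====
-- from collections import deque
--
-- def solution(command, lst):
--     command = deque(command)
--     lst = deque(lst)
--     ptr = 0
--     while len(command) != 0:
--         c = command.popleft()
--         if c == "R":
--             ptr = (1 if ptr == 0 else 0)
--         elif c == "D":
--             if not lst:
--                 return "error"
--             if ptr: lst.pop()
--             else: lst.popleft()
--
--     if ptr: lst.reverse() # tip: lst[::-1]
--     return str(list(lst)).replace(" ","")
-- ===== SOURCE B (Python) =====
-- def solution(command, lst):
--     p = 0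
--     front = 0
--     back = 0
--     n = len(lst)
--     for c in command:
--         if c == "R":
--             p = 1 - p
--         elif c == "D":
--             if front + back == n:
--                 return "error"
--             if p:
--                 back += 1
--             else:
--                 front += 1
--     res = lst[front:n - back]
--     if p:
--         res = res[::-1]
--     return "[" + ",".join(map(str, res)) + "]"
-- ===== Notes on version B (the rewrite author's own statement) =====
-- stated objective: simpler
-- what changed: B replaces A's deque mutation (popleft/pop per 'D') with three integer counters (parity, front, back) and one final slice of the untouched input list.
import Mathlib
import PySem

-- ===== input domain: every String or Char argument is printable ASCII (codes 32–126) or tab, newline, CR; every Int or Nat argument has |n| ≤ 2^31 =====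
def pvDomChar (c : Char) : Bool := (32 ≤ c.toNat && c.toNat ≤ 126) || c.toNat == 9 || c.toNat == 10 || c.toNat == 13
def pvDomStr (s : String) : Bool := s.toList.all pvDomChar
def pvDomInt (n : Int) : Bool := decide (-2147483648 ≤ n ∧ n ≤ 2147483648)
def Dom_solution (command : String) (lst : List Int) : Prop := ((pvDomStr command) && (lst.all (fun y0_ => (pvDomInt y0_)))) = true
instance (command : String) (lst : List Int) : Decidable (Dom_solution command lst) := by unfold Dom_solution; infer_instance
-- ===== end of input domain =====

-- B tracks parity and front/back removal counters instead of mutating a deque; one final slice. Same cost, simpler state.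

-- str(list(lst)).replace(" ","") for a list of ints == "[" + ",".join(map(str, lst)) + "]": exact.
def pyIntListStr (l : List Int) : String :=
  "[" ++ String.intercalate "," (l.map PySem.Int.toStr) ++ "]"

-- ===== PORT A =====
-- the while loop over deque(command); deque lst: popleft = tail, pop = dropLast; none = early "error" return
def solLoopA : List Char → List Int → Int → Option (List Int × Int)
  | [], l, p => some (l, p)
  | c :: cs, l, p =>
    if c = 'R' then solLoopA cs l (if p = 0 then 1 else 0)
    else if c = 'D' then
      if l = [] then none
      else if p ≠ 0 then solLoopA cs l.dropLast p
      else solLoopA cs l.tail p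
    else solLoopA cs l p

def solution (command : String) (lst : List Int) : String :=
  match solLoopA command.toList lst 0 with
  | none => "error"
  | some (l, p) => pyIntListStr (if p ≠ 0 then l.reverse else l)  -- if ptr: lst.reverse()

-- ===== PORT B =====
-- the for loop over command: parity p, counters front/back (Python ints that stay ≥ 0: Nat)
def solLoopB : List Char → Int → Nat → Nat → Nat → Option (Int × Nat × Nat)
  | [], p, f, b, _ => some (p, f, b)
  | c :: cs, p, f, b, n =>
    if c = 'R' then solLoopB cs (1 - p) f b n
    else if c = 'D' then
      if f + b = n then none
      else if p ≠ 0 then solLoopB cs p f (b + 1) n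
      else solLoopB cs p (f + 1) b n
    else solLoopB cs p f b n

def solution_alt (command : String) (lst : List Int) : String :=
  match solLoopB command.toList 0 0 0 lst.length with
  | none => "error"
  | some (p, f, b) =>
    let res := PySem.List.slice lst (some (f : Int)) (some ((lst.length - b : Nat) : Int))  -- lst[front:n-back]
    pyIntListStr (if p ≠ 0 then res.reverse else res)  -- res[::-1]

-- ===== PRECONDITION & SPEC =====
def Spec_solution (command : String) (lst : List Int) (out : String) : Prop := out = solution_alt command lst
instance (command : String) (lst : List Int) (out : String) : Decidable (Spec_solution command lst out) := by unfold Spec_solution; infer_instance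

-- ===== CLAIM (what is proved, stated in full; the proofs are below) =====
def Claim_equal_solution : Prop := ∀ (command : String) (lst : List Int), Dom_solution command lst → Spec_solution command lst (solution command lst)

-- ===== LEMMAS AND PROOFS =====

-- the remaining segment of lst after removing f from the front and b from the back
def seg (lst : List Int) (f b : Nat) : List Int :=
  (lst.drop f).take (lst.length - b - f)

lemma seg_zero (lst : List Int) : seg lst 0 0 = lst := by
  simp [seg]

lemma seg_eq_nil_iff (lst : List Int) (f b : Nat) (h : f + b ≤ lst.length) :
    seg lst f b = [] ↔ f + b = lst.length := by
  constructor
  · intro he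
    have := congrArg List.length he
    simp [seg] at this
    omega
  · intro he; simp [seg]; omega

lemma seg_tail (lst : List Int) (f b : Nat) :
    (seg lst f b).tail = seg lst (f + 1) b := by
  simp [seg, ← List.drop_one, List.drop_take, List.drop_drop]
  omega

lemma seg_dropLast (lst : List Int) (f b : Nat) (h : f + b ≤ lst.length) :
    (seg lst f b).dropLast = seg lst f (b + 1) := by
  have hlen : (seg lst f b).length = lst.length - b - f := by
    simp [seg]; omega
  rw [List.dropLast_eq_take, hlen]
  simp [seg, List.take_take]
  congr 1
  omega

lemma loop_rel (cs : List Char) (lst : List Int) :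
    ∀ (p : Int) (f b : Nat), (p = 0 ∨ p = 1) → f + b ≤ lst.length →
    solLoopA cs (seg lst f b) p =
      (solLoopB cs p f b lst.length).map (fun s => (seg lst s.2.1 s.2.2, s.1)) := by
  induction cs with
  | nil => intro p f b _ _; simp [solLoopA, solLoopB]
  | cons c cs ih =>
    intro p f b hp hfb
    by_cases hR : c = 'R'
    · have hpe : (if p = 0 then (1:Int) else 0) = 1 - p := by rcases hp with h | h <;> simp [h]
      have hp' : 1 - p = 0 ∨ 1 - p = 1 := by rcases hp with h | h <;> simp [h]
      simp only [solLoopA, solLoopB, if_pos hR, hpe]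
      exact ih (1 - p) f b hp' hfb
    · by_cases hD : c = 'D'
      · simp only [solLoopA, solLoopB, if_neg hR, if_pos hD]
        by_cases hemp : f + b = lst.length
        · rw [if_pos ((seg_eq_nil_iff lst f b hfb).mpr hemp), if_pos hemp]
          simp
        · rw [if_neg (fun he => hemp ((seg_eq_nil_iff lst f b hfb).mp he)), if_neg hemp]
          by_cases hpz : p ≠ 0
          · rw [if_pos hpz, if_pos hpz, seg_dropLast lst f b hfb]
            exact ih p f (b + 1) hp (by omega)
          · rw [if_neg hpz, if_neg hpz, seg_tail lst f b]
            exact ih p (f + 1) b hp (by omega)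
      · simp only [solLoopA, solLoopB, if_neg hR, if_neg hD]
        exact ih p f b hp hfb

lemma slice_eq_seg (lst : List Int) (f b : Nat) :
    PySem.List.slice lst (some (f : Int)) (some ((lst.length - b : Nat) : Int)) = seg lst f b := by
  rw [PySem.List.slice_natCast]
  simp [seg]

-- ===== VERDICT (by name: the statement is the Claim_ definition above) =====
theorem solution_spec : Claim_equal_solution := by
  intro command lst _
  unfold Spec_solution solution solution_alt
  have key := loop_rel command.toList lst 0 0 0 (Or.inl rfl) (Nat.zero_le _)
  rw [seg_zero] at key
  rw [key]
  cases h : solLoopB command.toList 0 0 0 lst.length with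
  | none => rfl
  | some s =>
    obtain ⟨p, f, b⟩ := s
    simp [slice_eq_seg]
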